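-- pv_equiv track=rewrite | github.com/sampsyo/bril | examples/to_ssa.py | get_phis
-- ===== SOURCE A (Python) =====
-- def get_phis(blocks, df, defs):
--     """Find where to insert phi-nodes in the blocks.
--
--     Produce a map from block names to variable names that need phi-nodes
--     in those blocks. (We will need to generate names and actually insert
--     instructions later.)
--     """
--     phis = {b: set() for b in blocks}
--     for v, v_defs in defs.items():
--         v_defs_list = list(v_defs)
--         for d in v_defs_list:
--             for block in df[d]:
--                 # Add a phi-node...
--                 if v not in phis[block]:
--                     # ..unless we already did.
--                     phis[block].add(v)
--                     if block not in v_defs_list: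
--                         v_defs_list.append(block)
--     return phis
-- ===== SOURCE B (Python) =====
-- def get_phis(blocks, df, defs):
--     """Precompute, once, the reflexive-transitive closure of the dominance-
--     frontier graph (per-node iterative DFS); then each variable's phi set is
--     a flat union of frontiers over the closure of its defining blocks --
--     there is no per-variable fixpoint or worklist at all."""
--     closure = {}
--     for d in df:
--         seen = {d}
--         stack = [d]
--         while stack:
--             x = stack.pop()
--             for y in df[x]:
--                 if y not in seen:
--                     seen.add(y)
--                     stack.append(y)
--         closure[d] = seen
--     phis = {b: set() for b in blocks}
--     for v, v_defs in defs.items():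
--         for d in v_defs:
--             for x in closure[d]:
--                 for b in df[x]:
--                     phis[b].add(v)
--     return phis
-- ===== Notes on version B (the rewrite author's own statement) =====
-- stated objective: alternative
-- what changed: B precomputes the reflexive-transitive closure of the dominance-frontier graph once (iterative per-node DFS, independent of the variables) and then forms each variable's phi set as a flat unconditional union of frontiers over the closure of its defining blocks, eliminating A's per-variable growing-worklist fixpoint with its 'block not in v_defs_list' list rescans.
-- outside the precondition, e.g. on get_phis(['a'], {'a': [], 'z': ['q']}, {}): A returns {'a': set()}, B raises KeyError
import Mathlib
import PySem

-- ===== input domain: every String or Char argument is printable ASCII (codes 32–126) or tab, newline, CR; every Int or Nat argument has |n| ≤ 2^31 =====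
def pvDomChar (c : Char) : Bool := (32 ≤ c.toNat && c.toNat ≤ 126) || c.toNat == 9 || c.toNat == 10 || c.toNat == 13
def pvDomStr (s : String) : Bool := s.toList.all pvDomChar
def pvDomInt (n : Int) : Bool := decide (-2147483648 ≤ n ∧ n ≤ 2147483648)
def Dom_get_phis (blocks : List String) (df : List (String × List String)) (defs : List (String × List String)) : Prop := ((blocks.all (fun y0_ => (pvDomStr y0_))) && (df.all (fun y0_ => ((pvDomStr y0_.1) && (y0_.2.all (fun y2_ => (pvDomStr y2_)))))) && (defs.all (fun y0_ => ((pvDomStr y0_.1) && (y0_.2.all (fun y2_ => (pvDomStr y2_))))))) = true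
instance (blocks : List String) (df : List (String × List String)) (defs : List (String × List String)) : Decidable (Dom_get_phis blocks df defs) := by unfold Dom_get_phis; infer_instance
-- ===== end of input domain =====

-- B replaces A's per-variable growing-worklist fixpoint by a variable-independent precomputation:
-- the reflexive-transitive closure of the dominance-frontier graph (per-node stack DFS) is built
-- once, and each variable's phi set is then a flat unconditional union over that closure.
-- Equality of the two ports is proved on Pre_ (KeyError-free inputs).

-- ===== PORT A =====
def pvInitPhisA (blocks : List String) : PySem.Dict String (PySem.Set String) :=
  blocks.foldl (fun d b => d.insert b PySem.Set.empty) PySem.Dict.empty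

def pvStepA (v : String) (pl : PySem.Dict String (PySem.Set String) × List String)
    (block : String) : PySem.Dict String (PySem.Set String) × List String :=
  if PySem.Set.contains (pl.1.getD block PySem.Set.empty) v then pl
  else
    (pl.1.modify block PySem.Set.empty (fun s => PySem.Set.add s v),
     if pl.2.contains block then pl.2 else pl.2 ++ [block])

def pvLoopA (dfD : PySem.Dict String (List String)) (v : String) :
    Nat → PySem.Dict String (PySem.Set String) → List String → Nat →
    PySem.Dict String (PySem.Set String) × List String
  | 0, phis, lst, _ => (phis, lst)
  | f+1, phis, lst, i =>
    match lst[i]? with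
    | none => (phis, lst)
    | some d =>
      let pl := (dfD.getD d []).foldl (pvStepA v) (phis, lst)
      pvLoopA dfD v f pl.1 pl.2 (i+1)

def get_phis (blocks : List String) (df : List (String × List String))
    (defs : List (String × List String)) : List (String × List String) :=
  let dfD := PySem.Dict.ofList df
  ((PySem.Dict.ofList defs).items.foldl
    (fun phis vp =>
      (pvLoopA dfD vp.1 (vp.2.length + dfD.values.flatten.length + 1) phis vp.2 0).1)
    (pvInitPhisA blocks)).items

-- ===== PORT B =====
def pvInitPhisB (blocks : List String) : PySem.Dict String (PySem.Set String) :=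
  blocks.foldl (fun d b => d.insert b PySem.Set.empty) PySem.Dict.empty

-- one step of the inner 'for y in df[x]' loop of the DFS: (seen, stack)
def pvDfsStep (p : PySem.Set String × List String) (y : String) :
    PySem.Set String × List String :=
  if PySem.Set.contains p.1 y then p else (PySem.Set.add p.1 y, p.2 ++ [y])

-- the 'while stack' loop (fuel-bounded; pop from the end as Python's list.pop)
def pvDfs (dfD : PySem.Dict String (List String)) :
    Nat → PySem.Set String → List String → PySem.Set String
  | 0, seen, _ => seen
  | f+1, seen, stack =>
    match stack.getLast? with
    | none => seen
    | some x =>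
      let p := (dfD.getD x []).foldl pvDfsStep (seen, stack.dropLast)
      pvDfs dfD f p.1 p.2

-- 'closure = {}; for d in df: …; closure[d] = seen'
def pvClosures (dfD : PySem.Dict String (List String)) :
    PySem.Dict String (PySem.Set String) :=
  dfD.keys.foldl
    (fun c d =>
      c.insert d (pvDfs dfD (dfD.values.flatten.length + 2) (PySem.Set.ofList [d]) [d]))
    PySem.Dict.empty

-- 'for d in v_defs: for x in closure[d]: for b in df[x]: phis[b].add(v)'
def pvRoundB (dfD : PySem.Dict String (List String))
    (clos : PySem.Dict String (PySem.Set String)) (v : String) (vdefs : List String)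
    (phis : PySem.Dict String (PySem.Set String)) : PySem.Dict String (PySem.Set String) :=
  vdefs.foldl
    (fun phis d =>
      (clos.getD d PySem.Set.empty).foldl
        (fun phis x =>
          (dfD.getD x []).foldl
            (fun phis b => phis.modify b PySem.Set.empty (fun s => PySem.Set.add s v)) phis)
        phis)
    phis

def get_phis_alt (blocks : List String) (df : List (String × List String))
    (defs : List (String × List String)) : List (String × List String) :=
  let dfD := PySem.Dict.ofList df
  let clos := pvClosures dfD
  ((PySem.Dict.ofList defs).items.foldl
    (fun phis vp => pvRoundB dfD clos vp.1 vp.2 phis)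
    (pvInitPhisB blocks)).items

-- ===== PRECONDITION & SPEC =====
-- Pre_ excludes the KeyError inputs of either program: A raises whenever some (transitively
-- reached) defining block has no dominance-frontier entry or a frontier mentions a block
-- outside `blocks`; B's closure precomputation additionally touches every df entry, so it
-- raises on ill-formed df entries A happens never to reach — those inputs are excluded too.
def Pre_get_phis (blocks : List String) (df : List (String × List String)) (defs : List (String × List String)) : Prop :=
  (∀ p ∈ defs, ∀ d ∈ p.2, d ∈ df.map Prod.fst) ∧
  (∀ p ∈ df, ∀ b ∈ p.2, b ∈ blocks ∧ b ∈ df.map Prod.fst)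
instance (blocks : List String) (df : List (String × List String)) (defs : List (String × List String)) : Decidable (Pre_get_phis blocks df defs) := by unfold Pre_get_phis; infer_instance

def pvWitness_get_phis : List String × (List (String × List String)) × (List (String × List String)) :=
  (["a", "b"], [("a", ["b"]), ("b", ["b"])], [("x", ["a"])])

def Spec_get_phis (blocks : List String) (df : List (String × List String)) (defs : List (String × List String)) (out : List (String × List String)) : Prop := out = get_phis_alt blocks df defs
instance (blocks : List String) (df : List (String × List String)) (defs : List (String × List String)) (out : List (String × List String)) : Decidable (Spec_get_phis blocks df defs out) := by unfold Spec_get_phis; infer_instance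

-- ===== CLAIM (what is proved, stated in full; the proofs are below) =====
def Claim_equal_get_phis : Prop := ∀ (blocks : List String) (df : List (String × List String)) (defs : List (String × List String)), Dom_get_phis blocks df defs → Pre_get_phis blocks df defs → Spec_get_phis blocks df defs (get_phis blocks df defs)

-- ===== LEMMAS AND PROOFS =====

-- The dominance-frontier successor function, edges, reachability, and the phi predicate.
def pvSucc (dfD : PySem.Dict String (List String)) (d : String) : List String := dfD.getD d []

def pvEdge (dfD : PySem.Dict String (List String)) (a b : String) : Prop := b ∈ pvSucc dfD a

def pvReach (dfD : PySem.Dict String (List String)) (src : List String) (x : String) : Prop :=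
  ∃ s ∈ src, Relation.ReflTransGen (pvEdge dfD) s x

def pvPhiP (dfD : PySem.Dict String (List String)) (src : List String) (b : String) : Prop :=
  ∃ x, pvReach dfD src x ∧ b ∈ pvSucc dfD x

-- The common per-variable round characterization: keys kept, v added exactly on pvPhiP.
def pvChar (dfD : PySem.Dict String (List String)) (v : String) (src : List String)
    (P R : PySem.Dict String (PySem.Set String)) : Prop :=
  R.keys = P.keys ∧ ∀ b,
    (pvPhiP dfD src b → R.getD b PySem.Set.empty = PySem.Set.add (P.getD b PySem.Set.empty) v) ∧
    (¬ pvPhiP dfD src b → R.getD b PySem.Set.empty = P.getD b PySem.Set.empty)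

-- generic: a nodup list included in another is no longer
theorem pvNodupSubLen (e u : List String) (h : e.Nodup) (hs : ∀ x ∈ e, x ∈ u) :
    e.length ≤ u.length := by
  classical
  calc e.length = e.toFinset.card := (List.toFinset_card_of_nodup h).symm
  _ ≤ u.toFinset.card := Finset.card_le_card (by intro x hx; simp only [List.mem_toFinset] at *; exact hs x hx)
  _ = u.dedup.length := List.card_toFinset u
  _ ≤ u.length := (List.dedup_sublist u).length_le

theorem pvSucc_subset_flatten (dfD : PySem.Dict String (List String)) (d b : String)
    (h : b ∈ pvSucc dfD d) : b ∈ dfD.values.flatten := by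
  unfold pvSucc at h
  cases hq : dfD.get? d with
  | none => rw [PySem.Dict.getD_of_get?_eq_none dfD [] hq] at h; cases h
  | some l =>
    rw [PySem.Dict.getD_eq_get?_getD, hq] at h
    have hit := PySem.Dict.mem_items_of_get?_eq_some dfD hq
    exact List.mem_flatten.mpr ⟨l, List.mem_map.mpr ⟨(d, l), hit, rfl⟩, h⟩

theorem pvReach_mem_of_closed (dfD : PySem.Dict String (List String)) (src : List String)
    (S : List String) (h4 : ∀ s ∈ src, s ∈ S)
    (hcl : ∀ x ∈ S, ∀ b ∈ pvSucc dfD x, b ∈ S) :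
    ∀ x, pvReach dfD src x → x ∈ S := by
  rintro x ⟨s, hs, hpath⟩
  induction hpath with
  | refl => exact h4 s hs
  | tail hp he ih => exact hcl _ ih _ he

-- membership marker for variable v
def pvM (v : String) (phis : PySem.Dict String (PySem.Set String)) (b : String) : Prop :=
  v ∈ phis.getD b PySem.Set.empty

-- worklist-state invariant of A's round (everything not depending on the cursor)
def pvStInv (dfD : PySem.Dict String (List String)) (v : String)
    (P phis : PySem.Dict String (PySem.Set String)) (src lst : List String) : Prop :=
  phis.keys = P.keys ∧
  (∀ b, (pvM v phis b → phis.getD b PySem.Set.empty = PySem.Set.add (P.getD b PySem.Set.empty) v) ∧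
        (¬ pvM v phis b → phis.getD b PySem.Set.empty = P.getD b PySem.Set.empty)) ∧
  (∀ b, pvM v phis b → pvPhiP dfD src b) ∧
  (∀ b, pvM v phis b → b ∈ lst) ∧
  (∀ b ∈ lst, b ∈ src ∨ pvM v phis b) ∧
  (∀ s ∈ src, s ∈ lst) ∧
  (∃ ext, lst = src ++ ext ∧ ext.Nodup ∧ ∀ b ∈ ext, b ∈ dfD.values.flatten)

theorem pvInner_spec (dfD : PySem.Dict String (List String)) (v : String)
    (P : PySem.Dict String (PySem.Set String)) (src : List String) :
    ∀ (L : List String) (phis : PySem.Dict String (PySem.Set String)) (lst : List String),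
    pvStInv dfD v P phis src lst →
    (∀ b ∈ L, pvPhiP dfD src b) →
    (∀ b ∈ L, b ∈ P.keys) →
    pvStInv dfD v P (L.foldl (pvStepA v) (phis, lst)).1 src (L.foldl (pvStepA v) (phis, lst)).2 ∧
    (∀ b, pvM v phis b → pvM v (L.foldl (pvStepA v) (phis, lst)).1 b) ∧
    (∀ b ∈ L, pvM v (L.foldl (pvStepA v) (phis, lst)).1 b) ∧
    (∃ app, (L.foldl (pvStepA v) (phis, lst)).2 = lst ++ app) := by
  intro L
  induction L with
  | nil =>
    intro phis lst hinv _ _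
    exact ⟨hinv, fun b h => h, by simp, ⟨[], by simp⟩⟩
  | cons b0 rest ih =>
    intro phis lst hinv hphi hkeys
    obtain ⟨I1, I2, I3, I4, I5, I7, ext, hel, hen, heu⟩ := hinv
    by_cases hm : PySem.Set.contains (phis.getD b0 PySem.Set.empty) v = true
    · have hmem : v ∈ phis.getD b0 PySem.Set.empty := (PySem.Set.contains_iff _ _).mp hm
      have hstep : pvStepA v (phis, lst) b0 = (phis, lst) := by
        unfold pvStepA; dsimp only; rw [if_pos hm]
      rw [List.foldl_cons, hstep]
      obtain ⟨ha, hb, hc, hd⟩ := ih phis lst ⟨I1, I2, I3, I4, I5, I7, ext, hel, hen, heu⟩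
        (fun b hbm => hphi b (List.mem_cons_of_mem _ hbm))
        (fun b hbm => hkeys b (List.mem_cons_of_mem _ hbm))
      refine ⟨ha, hb, ?_, hd⟩
      intro b hbm
      rcases List.mem_cons.mp hbm with h1 | h1
      · exact h1 ▸ hb b0 ((PySem.Set.contains_iff _ _).mp hm)
      · exact hc b h1
    · have hmv : ¬ pvM v phis b0 := fun h => hm ((PySem.Set.contains_iff _ _).mpr h)
      have hstep : pvStepA v (phis, lst) b0 =
          (phis.modify b0 PySem.Set.empty (fun s => PySem.Set.add s v),
           if lst.contains b0 then lst else lst ++ [b0]) := by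
        unfold pvStepA; dsimp only; rw [if_neg hm]
      rw [List.foldl_cons, hstep]
      have hget : ∀ b, (phis.modify b0 PySem.Set.empty (fun s => PySem.Set.add s v)).getD b PySem.Set.empty
          = if b = b0 then PySem.Set.add (phis.getD b0 PySem.Set.empty) v else phis.getD b PySem.Set.empty :=
        fun b => PySem.Dict.getD_modify phis b0 b PySem.Set.empty (fun s => PySem.Set.add s v)
      have hM : ∀ b, pvM v (phis.modify b0 PySem.Set.empty (fun s => PySem.Set.add s v)) b ↔ (b = b0 ∨ pvM v phis b) := by
        intro b
        unfold pvM
        rw [hget b]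
        split
        · next heq => simp [heq, PySem.Set.mem_add]
        · next hne => simp [hne]
      have hsub : ∀ x, x ∈ lst → x ∈ (if lst.contains b0 then lst else lst ++ [b0]) := by
        intro x hx; split <;> simp [hx]
      have hb0l : b0 ∈ (if lst.contains b0 then lst else lst ++ [b0]) := by
        split
        · next hcont => exact List.contains_iff_mem.mp hcont
        · simp
      have hinv' : pvStInv dfD v P (phis.modify b0 PySem.Set.empty (fun s => PySem.Set.add s v)) src
          (if lst.contains b0 then lst else lst ++ [b0]) := by
        refine ⟨?_, ?_, ?_, ?_, ?_, ?_, ?_⟩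
        · rw [PySem.Dict.keys_modify, PySem.Dict.keys_insert_of_contains _ _
            ((PySem.Dict.contains_iff_mem_keys phis b0).mpr (I1 ▸ hkeys b0 (List.mem_cons_self ..)))]
          exact I1
        · intro b
          constructor
          · intro hMb
            rw [hget b]
            rcases (hM b).mp hMb with h1 | h1
            · rw [if_pos h1, (I2 b0).2 hmv, h1]
            · by_cases h2 : b = b0
              · exact absurd (h2 ▸ h1) hmv
              · rw [if_neg h2]; exact (I2 b).1 h1
          · intro hMb
            have h2 : b ≠ b0 := fun he => hMb ((hM b).mpr (Or.inl he))
            have h3 : ¬ pvM v phis b := fun he => hMb ((hM b).mpr (Or.inr he))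
            rw [hget b, if_neg h2]
            exact (I2 b).2 h3
        · intro b hMb
          rcases (hM b).mp hMb with h1 | h1
          · exact h1 ▸ hphi b0 (List.mem_cons_self ..)
          · exact I3 b h1
        · intro b hMb
          rcases (hM b).mp hMb with h1 | h1
          · exact h1 ▸ hb0l
          · exact hsub b (I4 b h1)
        · intro b hbm
          by_cases h1 : b = b0
          · exact Or.inr ((hM b).mpr (Or.inl h1))
          · have hbl : b ∈ lst := by
              revert hbm; split
              · exact id
              · intro hbm
                rcases List.mem_append.mp hbm with h2 | h2
                · exact h2
                · exact absurd (List.mem_singleton.mp h2) h1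
            rcases I5 b hbl with h2 | h2
            · exact Or.inl h2
            · exact Or.inr ((hM b).mpr (Or.inr h2))
        · exact fun s hs => hsub s (I7 s hs)
        · by_cases hcont : lst.contains b0 = true
          · rw [if_pos hcont]; exact ⟨ext, hel, hen, heu⟩
          · rw [if_neg hcont]
            refine ⟨ext ++ [b0], by rw [hel, List.append_assoc], ?_, ?_⟩
            · have hb0nl : b0 ∉ lst := fun h => hcont (List.contains_iff_mem.mpr h)
              have hb0ne : b0 ∉ ext := fun h => hb0nl (hel ▸ List.mem_append.mpr (Or.inr h))
              exact List.Nodup.append hen (List.nodup_singleton b0)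
                (fun a ha hab => hb0ne ((List.mem_singleton.mp hab) ▸ ha))
            · intro b hbm
              rcases List.mem_append.mp hbm with h1 | h1
              · exact heu b h1
              · obtain ⟨x, _, hx2⟩ := hphi b0 (List.mem_cons_self ..)
                exact (List.mem_singleton.mp h1) ▸ pvSucc_subset_flatten dfD x b0 hx2
      obtain ⟨ha, hb, hc, hd⟩ := ih (phis.modify b0 PySem.Set.empty (fun s => PySem.Set.add s v))
        (if lst.contains b0 then lst else lst ++ [b0]) hinv'
        (fun b hbm => hphi b (List.mem_cons_of_mem _ hbm))
        (fun b hbm => hkeys b (List.mem_cons_of_mem _ hbm))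
      refine ⟨ha, ?_, ?_, ?_⟩
      · exact fun b hMb => hb b ((hM b).mpr (Or.inr hMb))
      · intro b hbm
        rcases List.mem_cons.mp hbm with h1 | h1
        · exact h1 ▸ hb b0 ((hM b0).mpr (Or.inl rfl))
        · exact hc b h1
      · obtain ⟨app, happ⟩ := hd
        rw [happ]
        split
        · exact ⟨app, rfl⟩
        · exact ⟨[b0] ++ app, by rw [List.append_assoc]⟩

theorem pvLoopA_char (dfD : PySem.Dict String (List String)) (v : String)
    (P : PySem.Dict String (PySem.Set String)) (src : List String)
    (HK : ∀ d b, b ∈ pvSucc dfD d → b ∈ P.keys) :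
    ∀ (f : Nat) (phis : PySem.Dict String (PySem.Set String)) (lst : List String) (i : Nat),
    pvStInv dfD v P phis src lst →
    i ≤ lst.length →
    (∀ j, j < i → ∀ b ∈ pvSucc dfD (lst.getD j ""), pvM v phis b) →
    src.length + dfD.values.flatten.length + 1 ≤ f + i →
    pvChar dfD v src P (pvLoopA dfD v f phis lst i).1 := by
  intro f
  induction f with
  | zero =>
    intro phis lst i hinv hi hproc hfuel
    exfalso
    obtain ⟨I1, I2, I3, I4, I5, I7, ext, hel, hen, heu⟩ := hinv
    have hextlen : ext.length ≤ dfD.values.flatten.length := pvNodupSubLen ext _ hen heu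
    have hll : lst.length = src.length + ext.length := by rw [hel, List.length_append]
    omega
  | succ f ih =>
    intro phis lst i hinv hi hproc hfuel
    simp only [pvLoopA]
    cases hgi : lst[i]? with
    | none =>
      have hge : lst.length ≤ i := List.getElem?_eq_none_iff.mp hgi
      obtain ⟨I1, I2, I3, I4, I5, I7, ext, hel, hen, heu⟩ := hinv
      have hmark : ∀ d ∈ lst, ∀ b ∈ pvSucc dfD d, pvM v phis b := by
        intro d hd b hb
        obtain ⟨j, hj, hje⟩ := List.mem_iff_getElem.mp hd
        exact hproc j (by omega) b (by rw [List.getD_eq_getElem lst "" hj, hje]; exact hb)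
      have hreach : ∀ x, pvReach dfD src x → x ∈ lst :=
        pvReach_mem_of_closed dfD src lst I7 (fun x hx b hb => I4 b (hmark x hx b hb))
      exact ⟨I1, fun b => ⟨fun ⟨x, hrx, hbs⟩ => (I2 b).1 (hmark x (hreach x hrx) b hbs),
        fun hnphi => (I2 b).2 (fun hMb => hnphi (I3 b hMb))⟩⟩
    | some d =>
      have hd_lst : d ∈ lst := List.mem_of_getElem? hgi
      have hilt : i < lst.length := by
        rcases List.getElem?_eq_some_iff.mp hgi with ⟨h, _⟩; exact h
      obtain ⟨I1, I2, I3, I4, I5, I7, ext, hel, hen, heu⟩ := hinv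
      have hreach_d : pvReach dfD src d := by
        rcases I5 d hd_lst with h1 | h1
        · exact ⟨d, h1, Relation.ReflTransGen.refl⟩
        · obtain ⟨x, ⟨s, hs, hpath⟩, hdx⟩ := I3 d h1
          exact ⟨s, hs, hpath.tail hdx⟩
      obtain ⟨ha, hmono, hLmark, app, happ⟩ := pvInner_spec dfD v P src (dfD.getD d []) phis lst
        ⟨I1, I2, I3, I4, I5, I7, ext, hel, hen, heu⟩
        (fun b hb => ⟨d, hreach_d, hb⟩)
        (fun b hb => HK d b hb)
      apply ih _ _ (i+1) ha
      · rw [happ, List.length_append]; omega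
      · intro j hj b hb
        rw [happ, List.getD_append lst app "" j (by omega)] at hb
        rcases Nat.lt_succ_iff_lt_or_eq.mp hj with h1 | h1
        · exact hmono b (hproc j h1 b hb)
        · have hgd : lst.getD i "" = d := by
            rw [List.getD_eq_getElem?_getD, hgi]; rfl
          exact hLmark b (by rw [h1, hgd] at hb; exact hb)
      · omega

-- ---- B side: the DFS closure ----

-- the inner 'for y in df[x]' fold appends exactly the new elements to seen and stack
theorem pvDfsFold : ∀ (L seen stack : List String),
    ∃ new, L.foldl pvDfsStep (seen, stack) = (seen ++ new, stack ++ new) ∧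
      new.Nodup ∧ (∀ y ∈ new, y ∈ L ∧ y ∉ seen) ∧ (∀ y ∈ L, y ∈ seen ++ new) := by
  intro L
  induction L with
  | nil => exact fun seen stack => ⟨[], by simp, List.nodup_nil, by simp, by simp⟩
  | cons y L ih =>
    intro seen stack
    simp only [List.foldl_cons]
    by_cases h : y ∈ seen
    · have hs : pvDfsStep (seen, stack) y = (seen, stack) := by
        unfold pvDfsStep; dsimp only; rw [if_pos ((PySem.Set.contains_iff _ _).mpr h)]
      rw [hs]
      obtain ⟨new, he, hn, hp, hm⟩ := ih seen stack
      refine ⟨new, he, hn, fun z hz => ⟨List.mem_cons_of_mem _ (hp z hz).1, (hp z hz).2⟩, ?_⟩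
      intro z hz
      rcases List.mem_cons.mp hz with h1 | h1
      · exact List.mem_append.mpr (Or.inl (h1 ▸ h))
      · exact hm z h1
    · have hc : ¬ PySem.Set.contains seen y = true := fun hh => h ((PySem.Set.contains_iff _ _).mp hh)
      have hs : pvDfsStep (seen, stack) y = (seen ++ [y], stack ++ [y]) := by
        unfold pvDfsStep; dsimp only
        rw [if_neg hc, PySem.Set.add_of_not_mem h]
      rw [hs]
      obtain ⟨new, he, hn, hp, hm⟩ := ih (seen ++ [y]) (stack ++ [y])
      refine ⟨y :: new, ?_, ?_, ?_, ?_⟩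
      · rw [he]; simp
      · refine List.nodup_cons.mpr ⟨fun hyn => ?_, hn⟩
        exact (hp y hyn).2 (List.mem_append.mpr (Or.inr (List.mem_singleton.mpr rfl)))
      · intro z hz
        rcases List.mem_cons.mp hz with h1 | h1
        · exact ⟨h1 ▸ List.mem_cons_self .., h1 ▸ h⟩
        · exact ⟨List.mem_cons_of_mem _ (hp z h1).1,
            fun hzs => (hp z h1).2 (List.mem_append.mpr (Or.inl hzs))⟩
      · intro z hz
        rcases List.mem_cons.mp hz with h1 | h1
        · simp [h1]
        · have := hm z h1
          rcases List.mem_append.mp this with h2 | h2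
          · rcases List.mem_append.mp h2 with h3 | h3
            · exact List.mem_append.mpr (Or.inl h3)
            · exact List.mem_append.mpr (Or.inr (List.mem_cons.mpr (Or.inl (List.mem_singleton.mp h3))))
          · exact List.mem_append.mpr (Or.inr (List.mem_cons_of_mem _ h2))

-- state invariant of the DFS
def pvDInv (dfD : PySem.Dict String (List String)) (d0 : String)
    (seen stack : List String) : Prop :=
  (∀ x ∈ seen, Relation.ReflTransGen (pvEdge dfD) d0 x) ∧
  d0 ∈ seen ∧
  (∀ x ∈ stack, x ∈ seen) ∧
  (∀ x ∈ seen, x ∉ stack → ∀ y ∈ pvSucc dfD x, y ∈ seen) ∧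
  seen.Nodup ∧ stack.Nodup ∧
  (∀ x ∈ seen, x = d0 ∨ x ∈ dfD.values.flatten)

theorem pvDfs_char (dfD : PySem.Dict String (List String)) (d0 : String) :
    ∀ (f : Nat) (seen stack : List String),
    pvDInv dfD d0 seen stack →
    stack.length + dfD.values.flatten.length + 2 ≤ f + seen.length →
    (pvDfs dfD f seen stack).Nodup ∧
    (∀ x, x ∈ pvDfs dfD f seen stack ↔ Relation.ReflTransGen (pvEdge dfD) d0 x) := by
  intro f
  induction f with
  | zero =>
    intro seen stack hinv hfuel
    exfalso
    obtain ⟨S1, S2, S3, S4, S5, S6, S7⟩ := hinv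
    have : seen.length ≤ (d0 :: dfD.values.flatten).length :=
      pvNodupSubLen seen _ S5 (by
        intro x hx
        rcases S7 x hx with h | h
        · exact h ▸ List.mem_cons_self ..
        · exact List.mem_cons_of_mem _ h)
    simp only [List.length_cons] at this
    omega
  | succ f ih =>
    intro seen stack hinv hfuel
    obtain ⟨S1, S2, S3, S4, S5, S6, S7⟩ := hinv
    cases hl : stack.getLast? with
    | none =>
      have hnil : stack = [] := List.getLast?_eq_none_iff.mp hl
      subst hnil
      simp only [pvDfs, List.getLast?_nil]
      refine ⟨S5, fun x => ⟨S1 x, fun hrt => ?_⟩⟩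
      exact pvReach_mem_of_closed dfD [d0] seen
        (fun s hs => (List.mem_singleton.mp hs) ▸ S2)
        (fun x hx y hy => S4 x hx (List.not_mem_nil) y hy)
        x ⟨d0, List.mem_singleton.mpr rfl, hrt⟩
    | some x =>
      obtain ⟨dl, heq⟩ := List.getLast?_eq_some_iff.mp hl
      have hdl : stack.dropLast = dl := by rw [heq]; exact List.dropLast_concat ..
      rw [← hdl] at heq
      have hx_seen : x ∈ seen := S3 x (heq ▸ List.mem_append.mpr (Or.inr (List.mem_singleton.mpr rfl)))
      obtain ⟨new, he, hn, hp, hm⟩ := pvDfsFold (dfD.getD x []) seen stack.dropLast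
      simp only [pvDfs, hl]
      rw [he]
      have hdl_sub : ∀ a ∈ stack.dropLast, a ∈ stack := fun a ha => (List.dropLast_sublist stack).mem ha
      have hdisj : ∀ a ∈ seen, a ∉ new := fun a ha han => (hp a han).2 ha
      apply ih (seen ++ new) (stack.dropLast ++ new)
      · refine ⟨?_, ?_, ?_, ?_, ?_, ?_, ?_⟩
        · intro z hz
          rcases List.mem_append.mp hz with h1 | h1
          · exact S1 z h1
          · exact (S1 x hx_seen).tail ((hp z h1).1 : z ∈ pvSucc dfD x)
        · exact List.mem_append.mpr (Or.inl S2)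
        · intro z hz
          rcases List.mem_append.mp hz with h1 | h1
          · exact List.mem_append.mpr (Or.inl (S3 z (hdl_sub z h1)))
          · exact List.mem_append.mpr (Or.inr h1)
        · intro z hz hznot y hy
          rcases List.mem_append.mp hz with h1 | h1
          · by_cases hzx : z = x
            · exact hm y (hzx ▸ hy)
            · have hzs : z ∉ stack := by
                intro hzst
                rcases List.mem_append.mp (heq ▸ hzst) with h2 | h2
                · exact hznot (List.mem_append.mpr (Or.inl h2))
                · exact hzx (List.mem_singleton.mp h2)
              have : z ∉ stack := hzs
              exact List.mem_append.mpr (Or.inl (S4 z h1 this y hy))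
          · exact absurd (List.mem_append.mpr (Or.inr h1)) hznot
        · exact List.Nodup.append S5 hn (fun a ha hab => (hdisj a ha) hab)
        · refine List.Nodup.append (S6.sublist (List.dropLast_sublist stack)) hn ?_
          intro a ha hab
          exact (hdisj a (S3 a (hdl_sub a ha))) hab
        · intro z hz
          rcases List.mem_append.mp hz with h1 | h1
          · exact S7 z h1
          · exact Or.inr (pvSucc_subset_flatten dfD x z ((hp z h1).1 : z ∈ pvSucc dfD x))
      · have hsl : stack.length = stack.dropLast.length + 1 := by
          conv_lhs => rw [heq]
          simp
        rw [List.length_append, List.length_append]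
        omega

-- getD through a fold of inserts over distinct keys
theorem pvGetDFoldlInsertNotMem {ν : Type} (g : String → ν) :
    ∀ (l : List String) (c : PySem.Dict String ν) (k : String) (dflt : ν), k ∉ l →
    (l.foldl (fun c d => c.insert d (g d)) c).getD k dflt = c.getD k dflt := by
  intro l
  induction l with
  | nil => intro c k dflt _; rfl
  | cons d l ih =>
    intro c k dflt hk
    simp only [List.foldl_cons]
    rw [ih _ _ _ (fun h => hk (List.mem_cons_of_mem _ h)), PySem.Dict.getD_insert]
    rw [if_neg (fun h => hk (by rw [h]; exact List.mem_cons_self ..))]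

theorem pvGetDFoldlInsert {ν : Type} (g : String → ν) :
    ∀ (l : List String) (c : PySem.Dict String ν) (k : String) (dflt : ν),
    l.Nodup → k ∈ l →
    (l.foldl (fun c d => c.insert d (g d)) c).getD k dflt = g k := by
  intro l
  induction l with
  | nil => intro c k dflt _ hk; cases hk
  | cons d l ih =>
    intro c k dflt hnd hk
    simp only [List.foldl_cons]
    rcases List.mem_cons.mp hk with h1 | h1
    · subst h1
      rw [pvGetDFoldlInsertNotMem g l _ k dflt (List.nodup_cons.mp hnd).1]
      rw [PySem.Dict.getD_insert, if_pos rfl]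
    · exact ih _ k dflt (List.nodup_cons.mp hnd).2 h1

-- the closure dict is exactly graph reachability, for every df key
theorem pvClos_char (dfD : PySem.Dict String (List String)) (hnd : dfD.keys.Nodup)
    (d : String) (hd : d ∈ dfD.keys) :
    ∀ x, x ∈ (pvClosures dfD).getD d PySem.Set.empty ↔
      Relation.ReflTransGen (pvEdge dfD) d x := by
  unfold pvClosures
  rw [pvGetDFoldlInsert _ dfD.keys PySem.Dict.empty d _ hnd hd]
  have hofl : PySem.Set.ofList [d] = [d] :=
    PySem.Set.ofList_eq_self_of_nodup [d] (List.nodup_singleton d)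
  rw [hofl]
  refine (pvDfs_char dfD d (dfD.values.flatten.length + 2) [d] [d] ?_ (by simp; omega)).2
  refine ⟨?_, List.mem_singleton.mpr rfl, fun x hx => hx, ?_, List.nodup_singleton d,
    List.nodup_singleton d, fun x hx => Or.inl (List.mem_singleton.mp hx)⟩
  · intro x hx
    rw [List.mem_singleton.mp hx]
  · intro x hx hnx
    exact absurd hx hnx

-- B phase 2, inner: add v to every block of one frontier list
theorem pvInnerB_char (v : String) :
    ∀ (M : List String) (P : PySem.Dict String (PySem.Set String)),
    (∀ b ∈ M, b ∈ P.keys) →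
    (M.foldl (fun phis b => phis.modify b PySem.Set.empty (fun s => PySem.Set.add s v)) P).keys = P.keys ∧
    (∀ b ∈ M, (M.foldl (fun phis b => phis.modify b PySem.Set.empty (fun s => PySem.Set.add s v)) P).getD b PySem.Set.empty = PySem.Set.add (P.getD b PySem.Set.empty) v) ∧
    (∀ b, b ∉ M → (M.foldl (fun phis b => phis.modify b PySem.Set.empty (fun s => PySem.Set.add s v)) P).getD b PySem.Set.empty = P.getD b PySem.Set.empty) := by
  intro M
  induction M with
  | nil => exact fun P _ => ⟨rfl, by simp, fun b _ => rfl⟩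
  | cons b0 rest ih =>
    intro P h
    have hc : (P.modify b0 PySem.Set.empty (fun s => PySem.Set.add s v)).keys = P.keys := by
      rw [PySem.Dict.keys_modify, PySem.Dict.keys_insert_of_contains _ _
        ((PySem.Dict.contains_iff_mem_keys P b0).mpr (h b0 (by simp)))]
    have hg : ∀ b, (P.modify b0 PySem.Set.empty (fun s => PySem.Set.add s v)).getD b PySem.Set.empty
        = if b = b0 then PySem.Set.add (P.getD b0 PySem.Set.empty) v else P.getD b PySem.Set.empty := by
      intro b; exact PySem.Dict.getD_modify P b0 b PySem.Set.empty (fun s => PySem.Set.add s v)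
    obtain ⟨ihk, ihm, ihn⟩ := ih (P.modify b0 PySem.Set.empty (fun s => PySem.Set.add s v))
      (fun b hb => hc ▸ h b (List.mem_cons_of_mem _ hb))
    simp only [List.foldl_cons]
    refine ⟨by rw [ihk, hc], ?_, ?_⟩
    · intro b hb
      by_cases hbr : b ∈ rest
      · rw [ihm b hbr, hg b]
        split
        · next heq => rw [heq, PySem.Set.add_of_mem (x := v) ((PySem.Set.mem_add _ v v).mpr (Or.inr rfl))]
        · rfl
      · have hb0 : b = b0 := by rcases List.mem_cons.mp hb with h1 | h1; exact h1; exact absurd h1 hbr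
        rw [ihn b hbr, hg b, if_pos hb0, hb0]
    · intro b hb
      have hb1 : b ≠ b0 := fun he => hb (he ▸ List.mem_cons_self ..)
      have hb2 : b ∉ rest := fun he => hb (List.mem_cons_of_mem _ he)
      rw [ihn b hb2, hg b, if_neg hb1]

-- B phase 2, middle: add v to every frontier block of every element of a list
theorem pvPhase2_spec (dfD : PySem.Dict String (List String)) (v : String) :
    ∀ (L : List String) (P : PySem.Dict String (PySem.Set String)),
    (∀ d b, b ∈ pvSucc dfD d → b ∈ P.keys) →
    (L.foldl (fun phis d => (dfD.getD d []).foldl (fun phis b => phis.modify b PySem.Set.empty (fun s => PySem.Set.add s v)) phis) P).keys = P.keys ∧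
    (∀ b, (∃ d ∈ L, b ∈ pvSucc dfD d) → (L.foldl (fun phis d => (dfD.getD d []).foldl (fun phis b => phis.modify b PySem.Set.empty (fun s => PySem.Set.add s v)) phis) P).getD b PySem.Set.empty = PySem.Set.add (P.getD b PySem.Set.empty) v) ∧
    (∀ b, (¬ ∃ d ∈ L, b ∈ pvSucc dfD d) → (L.foldl (fun phis d => (dfD.getD d []).foldl (fun phis b => phis.modify b PySem.Set.empty (fun s => PySem.Set.add s v)) phis) P).getD b PySem.Set.empty = P.getD b PySem.Set.empty) := by
  intro L
  induction L with
  | nil => exact fun P _ => ⟨rfl, by simp, fun b _ => rfl⟩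
  | cons d0 rest ih =>
    intro P HK
    obtain ⟨k1, m1, n1⟩ := pvInnerB_char v (dfD.getD d0 []) P (fun b hb => HK d0 b hb)
    obtain ⟨ihk, ihm, ihn⟩ := ih
      ((dfD.getD d0 []).foldl (fun phis b => phis.modify b PySem.Set.empty (fun s => PySem.Set.add s v)) P)
      (fun d b hb => k1 ▸ HK d b hb)
    simp only [List.foldl_cons]
    refine ⟨by rw [ihk, k1], ?_, ?_⟩
    · intro b hb
      by_cases hbr : ∃ d ∈ rest, b ∈ pvSucc dfD d
      · rw [ihm b hbr]
        by_cases hb0 : b ∈ pvSucc dfD d0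
        · rw [m1 b hb0, PySem.Set.add_of_mem (x := v) ((PySem.Set.mem_add _ v v).mpr (Or.inr rfl))]
        · rw [n1 b hb0]
      · have hb0 : b ∈ pvSucc dfD d0 := by
          rcases hb with ⟨d, hd, hbd⟩
          rcases List.mem_cons.mp hd with h1 | h1
          · exact h1 ▸ hbd
          · exact absurd ⟨d, h1, hbd⟩ hbr
        rw [ihn b hbr, m1 b hb0]
    · intro b hb
      have hb1 : b ∉ pvSucc dfD d0 := fun he => hb ⟨d0, List.mem_cons_self .., he⟩
      have hb2 : ¬ ∃ d ∈ rest, b ∈ pvSucc dfD d := fun ⟨d, hd, he⟩ => hb ⟨d, List.mem_cons_of_mem _ hd, he⟩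
      rw [ihn b hb2, n1 b hb1]

-- B's whole round satisfies the common characterization
theorem pvRoundB_char (dfD : PySem.Dict String (List String))
    (clos : PySem.Dict String (PySem.Set String)) (v : String) :
    ∀ (src : List String) (P : PySem.Dict String (PySem.Set String)),
    (∀ d b, b ∈ pvSucc dfD d → b ∈ P.keys) →
    (∀ d ∈ src, ∀ x, x ∈ clos.getD d PySem.Set.empty ↔ Relation.ReflTransGen (pvEdge dfD) d x) →
    pvChar dfD v src P (pvRoundB dfD clos v src P) := by
  intro src
  induction src with
  | nil =>
    intro P _ _
    exact ⟨rfl, fun b => ⟨fun ⟨x, ⟨s, hs, _⟩, _⟩ => absurd hs (List.not_mem_nil),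
      fun _ => rfl⟩⟩
  | cons d rest ih =>
    intro P HK hclos
    unfold pvRoundB
    simp only [List.foldl_cons]
    obtain ⟨k1, m1, n1⟩ := pvPhase2_spec dfD v (clos.getD d PySem.Set.empty) P HK
    have hL : ∀ b, (∃ x ∈ clos.getD d PySem.Set.empty, b ∈ pvSucc dfD x) ↔
        (∃ x, Relation.ReflTransGen (pvEdge dfD) d x ∧ b ∈ pvSucc dfD x) := by
      intro b
      constructor
      · rintro ⟨x, hx, hb⟩
        exact ⟨x, (hclos d (List.mem_cons_self ..) x).mp hx, hb⟩
      · rintro ⟨x, hx, hb⟩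
        exact ⟨x, (hclos d (List.mem_cons_self ..) x).mpr hx, hb⟩
    obtain ⟨k2, v2⟩ := ih
      ((clos.getD d PySem.Set.empty).foldl (fun phis x => (dfD.getD x []).foldl (fun phis b => phis.modify b PySem.Set.empty (fun s => PySem.Set.add s v)) phis) P)
      (fun d' b hb => k1 ▸ HK d' b hb)
      (fun d' hd' x => hclos d' (List.mem_cons_of_mem _ hd') x)
    have hsplit : ∀ b, pvPhiP dfD (d :: rest) b ↔
        ((∃ x, Relation.ReflTransGen (pvEdge dfD) d x ∧ b ∈ pvSucc dfD x) ∨ pvPhiP dfD rest b) := by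
      intro b
      constructor
      · rintro ⟨x, ⟨s, hs, hrt⟩, hbs⟩
        rcases List.mem_cons.mp hs with h1 | h1
        · exact Or.inl ⟨x, h1 ▸ hrt, hbs⟩
        · exact Or.inr ⟨x, ⟨s, h1, hrt⟩, hbs⟩
      · rintro (⟨x, hrt, hbs⟩ | ⟨x, ⟨s, hs, hrt⟩, hbs⟩)
        · exact ⟨x, ⟨d, List.mem_cons_self .., hrt⟩, hbs⟩
        · exact ⟨x, ⟨s, List.mem_cons_of_mem _ hs, hrt⟩, hbs⟩
    unfold pvRoundB at k2 v2
    refine ⟨by rw [k2, k1], ?_⟩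
    intro b
    constructor
    · intro hphi
      rcases (hsplit b).mp hphi with hD | hR
      all_goals by_cases hR' : pvPhiP dfD rest b
      · rw [(v2 b).1 hR', m1 b ((hL b).mpr hD),
          PySem.Set.add_of_mem (x := v) ((PySem.Set.mem_add _ v v).mpr (Or.inr rfl))]
      · rw [(v2 b).2 hR', m1 b ((hL b).mpr hD)]
      · rw [(v2 b).1 hR']
        by_cases hD' : ∃ x, Relation.ReflTransGen (pvEdge dfD) d x ∧ b ∈ pvSucc dfD x
        · rw [m1 b ((hL b).mpr hD'),
            PySem.Set.add_of_mem (x := v) ((PySem.Set.mem_add _ v v).mpr (Or.inr rfl))]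
        · rw [n1 b (fun he => hD' ((hL b).mp he))]
      · exact absurd hR hR'
    · intro hnphi
      have hD : ¬ ∃ x, Relation.ReflTransGen (pvEdge dfD) d x ∧ b ∈ pvSucc dfD x :=
        fun h => hnphi ((hsplit b).mpr (Or.inl h))
      have hR : ¬ pvPhiP dfD rest b := fun h => hnphi ((hsplit b).mpr (Or.inr h))
      rw [(v2 b).2 hR, n1 b (fun he => hD ((hL b).mp he))]

-- A's per-variable round satisfies the common characterization
theorem pvRoundA_char (dfD : PySem.Dict String (List String)) (v : String) (src : List String)
    (P : PySem.Dict String (PySem.Set String))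
    (HK : ∀ d b, b ∈ pvSucc dfD d → b ∈ P.keys)
    (Hv : ∀ b, ¬ pvM v P b) :
    pvChar dfD v src P (pvLoopA dfD v (src.length + dfD.values.flatten.length + 1) P src 0).1 := by
  apply pvLoopA_char dfD v P src HK
  · exact ⟨rfl,
      fun b => ⟨fun h => absurd h (Hv b), fun _ => rfl⟩,
      fun b h => absurd h (Hv b),
      fun b h => absurd h (Hv b),
      fun b hb => Or.inl hb,
      fun s hs => hs,
      ⟨[], by simp, List.nodup_nil, by simp⟩⟩
  · exact Nat.zero_le _
  · intro j hj; omega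
  · omega

theorem pvChar_unique (dfD : PySem.Dict String (List String)) (v : String) (src : List String)
    (P R1 R2 : PySem.Dict String (PySem.Set String)) (hnd : P.keys.Nodup)
    (h1 : pvChar dfD v src P R1) (h2 : pvChar dfD v src P R2) : R1 = R2 := by
  obtain ⟨k1, v1⟩ := h1
  obtain ⟨k2, v2⟩ := h2
  apply PySem.Dict.ext
  rw [PySem.Dict.items_eq_map_keys R1 (k1 ▸ hnd) PySem.Set.empty,
      PySem.Dict.items_eq_map_keys R2 (k2 ▸ hnd) PySem.Set.empty, k1, k2]
  apply List.map_congr_left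
  intro k _
  by_cases hp : pvPhiP dfD src k
  · rw [(v1 k).1 hp, (v2 k).1 hp]
  · rw [(v1 k).2 hp, (v2 k).2 hp]

theorem pvOuter (dfD : PySem.Dict String (List String))
    (clos : PySem.Dict String (PySem.Set String))
    (hclos : ∀ d ∈ dfD.keys, ∀ x, x ∈ clos.getD d PySem.Set.empty ↔ Relation.ReflTransGen (pvEdge dfD) d x) :
    ∀ (its : List (String × List String)) (P : PySem.Dict String (PySem.Set String)),
    (∀ d b, b ∈ pvSucc dfD d → b ∈ P.keys) →
    P.keys.Nodup →
    (∀ p ∈ its, ∀ b, ¬ pvM p.1 P b) →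
    ((its.map Prod.fst).Nodup) →
    (∀ p ∈ its, ∀ d ∈ p.2, d ∈ dfD.keys) →
    its.foldl (fun phis vp => (pvLoopA dfD vp.1 (vp.2.length + dfD.values.flatten.length + 1) phis vp.2 0).1) P
      = its.foldl (fun phis vp => pvRoundB dfD clos vp.1 vp.2 phis) P := by
  intro its
  induction its with
  | nil => intro P _ _ _ _ _; rfl
  | cons vp rest ih =>
    intro P HK hnd hfresh hmapnd hdefs
    have hA := pvRoundA_char dfD vp.1 vp.2 P HK (fun b => hfresh vp (List.mem_cons_self ..) b)
    have hB := pvRoundB_char dfD clos vp.1 vp.2 P HK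
      (fun d hd x => hclos d (hdefs vp (List.mem_cons_self ..) d hd) x)
    have heq := pvChar_unique dfD vp.1 vp.2 P _ _ hnd hA hB
    simp only [List.foldl_cons]
    rw [heq]
    obtain ⟨kR, vR⟩ := hB
    have hvp_not : vp.1 ∉ rest.map Prod.fst := by
      have := hmapnd
      simp only [List.map_cons, List.nodup_cons] at this
      exact this.1
    apply ih
    · exact fun d b hb => kR.symm ▸ HK d b hb
    · rw [kR]; exact hnd
    · intro p hp b hMb
      unfold pvM at hMb
      by_cases hphi : pvPhiP dfD vp.2 b
      · rw [(vR b).1 hphi] at hMb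
        rcases (PySem.Set.mem_add _ _ _).mp hMb with h1 | h1
        · exact hfresh p (List.mem_cons_of_mem _ hp) b h1
        · exact hvp_not (h1 ▸ List.mem_map.mpr ⟨p, hp, rfl⟩)
      · rw [(vR b).2 hphi] at hMb
        exact hfresh p (List.mem_cons_of_mem _ hp) b hMb
    · simp only [List.map_cons, List.nodup_cons] at hmapnd
      exact hmapnd.2
    · exact fun p hp => hdefs p (List.mem_cons_of_mem _ hp)

theorem pvFoldlIns_items_sub {ν : Type} :
    ∀ (l : List (String × ν)) (acc : PySem.Dict String ν) (p : String × ν),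
    p ∈ (l.foldl (fun acc q => acc.insert q.1 q.2) acc).items → p ∈ acc.items ∨ p ∈ l := by
  intro l
  induction l with
  | nil => intro acc p h; exact Or.inl h
  | cons q rest ih =>
    intro acc p h
    rcases ih (acc.insert q.1 q.2) p h with hh | hh
    · rcases (PySem.Dict.mem_items_insert acc q.1 q.2 p).mp hh with h2 | h2
      · exact Or.inr (by simp [h2])
      · exact Or.inl h2.1
    · exact Or.inr (List.mem_cons_of_mem _ hh)

theorem pvOfList_items_sub {ν : Type} (l : List (String × ν)) (p : String × ν)
    (h : p ∈ (PySem.Dict.ofList l).items) : p ∈ l := by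
  have hres := pvFoldlIns_items_sub l PySem.Dict.empty p (by
    simpa [PySem.Dict.ofList, PySem.Dict.update] using h)
  rcases hres with hh | hh
  · simp [PySem.Dict.empty] at hh
  · exact hh

theorem pvMemKeysOfList {ν : Type} (l : List (String × ν)) (k : String)
    (h : k ∈ l.map Prod.fst) : k ∈ (PySem.Dict.ofList l).keys := by
  have he : PySem.Dict.ofList l = l.foldl (fun d p => d.insert p.1 p.2) PySem.Dict.empty := by
    simp [PySem.Dict.ofList, PySem.Dict.update]
  rw [he, PySem.Dict.keys_foldl_insert_key l Prod.fst (fun d p => p.2) PySem.Dict.empty]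
  simp only [PySem.Dict.keys_empty, PySem.Set.update_nil_left]
  exact (PySem.Set.mem_ofList _ k).mpr h

theorem pvFoldlInit_getD :
    ∀ (l : List String) (acc : PySem.Dict String (PySem.Set String)) (b : String),
    (∀ bq, acc.getD bq PySem.Set.empty = PySem.Set.empty) →
    (l.foldl (fun d b => d.insert b PySem.Set.empty) acc).getD b PySem.Set.empty = PySem.Set.empty := by
  intro l
  induction l with
  | nil => intro acc b h; exact h b
  | cons x rest ih =>
    intro acc b h
    exact ih _ b (by intro bq; rw [PySem.Dict.getD_insert]; split <;> first | rfl | exact h bq)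

theorem pvInit_getD (blocks : List String) (b : String) :
    (pvInitPhisA blocks).getD b PySem.Set.empty = PySem.Set.empty := by
  exact pvFoldlInit_getD blocks PySem.Dict.empty b (by intro bq; simp [PySem.Dict.getD_empty])

theorem pvInit_keys (blocks : List String) :
    (pvInitPhisA blocks).keys = PySem.Set.ofList blocks := by
  unfold pvInitPhisA
  rw [PySem.Dict.keys_foldl_insert blocks (fun _ _ => PySem.Set.empty) PySem.Dict.empty]
  simp [PySem.Dict.keys_empty, PySem.Set.update_nil_left]

-- ===== VERDICT (by name: the statement is the Claim_ definition above) =====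
theorem get_phis_spec : Claim_equal_get_phis := by
  unfold Claim_equal_get_phis
  intro blocks df defs _ hpre
  unfold Spec_get_phis
  simp only [get_phis, get_phis_alt]
  have hinit : pvInitPhisB blocks = pvInitPhisA blocks := rfl
  rw [hinit]
  have hnddf : (PySem.Dict.ofList df).keys.Nodup := by
    simpa [PySem.Dict.keys] using PySem.Dict.nodup_keys_ofList df
  refine congrArg PySem.Dict.items (pvOuter (PySem.Dict.ofList df)
    (pvClosures (PySem.Dict.ofList df))
    (fun d hd x => pvClos_char (PySem.Dict.ofList df) hnddf d hd x)
    (PySem.Dict.ofList defs).items (pvInitPhisA blocks) ?_ ?_ ?_ ?_ ?_)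
  · intro d b hb
    rw [pvInit_keys]
    apply (PySem.Set.mem_ofList blocks b).mpr
    unfold pvSucc at hb
    cases hq : (PySem.Dict.ofList df).get? d with
    | none => rw [PySem.Dict.getD_of_get?_eq_none _ [] hq] at hb; cases hb
    | some l =>
      rw [PySem.Dict.getD_eq_get?_getD, hq] at hb
      exact (hpre.2 (d, l) (pvOfList_items_sub df (d, l) (PySem.Dict.mem_items_of_get?_eq_some _ hq)) b hb).1
  · rw [pvInit_keys]; exact PySem.Set.nodup_ofList blocks
  · intro p _ b hMb
    unfold pvM at hMb
    rw [pvInit_getD] at hMb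
    exact (List.not_mem_nil) hMb
  · simpa [PySem.Dict.keys] using PySem.Dict.nodup_keys_ofList defs
  · intro p hp d hd
    exact pvMemKeysOfList df d
      (hpre.1 p (pvOfList_items_sub defs p hp) d hd)
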